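-- pv_equiv track=rewrite | github.com/jupyterlab/jupyter-ai | packages/jupyter-ai/jupyter_ai/secrets/secrets_utils.py | get_whitespace_around
-- ===== SOURCE A (Python) =====
-- def get_whitespace_around(text: str) -> tuple[str, str]:
--     """
--     Extract whitespace prefix and suffix from a string.
--
--     Args:
--         text: The input string
--
--     Returns:
--         A tuple of (prefix, suffix) where prefix is the leading whitespace
--         and suffix is the trailing whitespace
--     """
--     if not text:
--         return ("", "")
--
--     # Find prefix (leading whitespace)
--     prefix_end = 0
--     for i, char in enumerate(text):
--         if not char.isspace():
--             prefix_end = i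
--             break
--     else:
--         # String is all whitespace
--         return (text, "")
--
--     # Find suffix (trailing whitespace)
--     suffix_start = len(text)
--     for i in range(len(text) - 1, -1, -1):
--         if not text[i].isspace():
--             suffix_start = i + 1
--             break
--
--     prefix = text[:prefix_end]
--     suffix = text[suffix_start:]
--
--     return (prefix, suffix)
-- ===== SOURCE B (Python) =====
-- def get_whitespace_around(text: str) -> tuple[str, str]:
--     """
--     Extract whitespace prefix and suffix from a string.
--
--     Single forward pass with a state machine: while no non-space character
--     has been seen, whitespace goes into the prefix accumulator; afterwards,
--     whitespace goes into a pending buffer that is discarded on every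
--     non-space character, so at the end it holds exactly the trailing run.
--     No backward scan, no slicing; empty / all-whitespace strings need no
--     special case (prefix is then the whole string and pending is empty).
--     """
--     prefix = []
--     pending = []
--     in_prefix = True
--     for ch in text:
--         if ch.isspace():
--             if in_prefix:
--                 prefix.append(ch)
--             else:
--                 pending.append(ch)
--         else:
--             in_prefix = False
--             pending.clear()
--     return ("".join(prefix), "".join(pending))
-- ===== Notes on version B (the rewrite author's own statement) =====
-- stated objective: alternative
-- what changed: Replaced A's two boundary-index scans (forward enumerate with for/else, backward range loop) plus slicing by a single forward pass over the characters with a three-field state machine (prefix accumulator, pending trailing-whitespace buffer cleared at each non-space character, in-prefix flag); no backward scan, no slicing, and no special case for empty/all-whitespace input.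
import Mathlib
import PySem

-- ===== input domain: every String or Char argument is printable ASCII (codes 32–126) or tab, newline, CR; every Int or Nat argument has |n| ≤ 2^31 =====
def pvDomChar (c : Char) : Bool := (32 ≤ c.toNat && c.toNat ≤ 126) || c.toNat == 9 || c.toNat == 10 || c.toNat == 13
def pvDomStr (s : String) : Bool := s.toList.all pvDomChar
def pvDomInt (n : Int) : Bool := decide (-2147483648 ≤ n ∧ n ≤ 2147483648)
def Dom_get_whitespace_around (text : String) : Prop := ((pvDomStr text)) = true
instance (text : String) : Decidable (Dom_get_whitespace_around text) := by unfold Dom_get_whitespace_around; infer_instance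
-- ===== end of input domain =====

-- B replaces A's forward+backward boundary scans and slicing by a single forward pass
-- with a state machine (prefix accumulator, pending trailing-whitespace buffer, flag) — alternative decomposition.


-- ===== PORT A =====
-- forward loop: 'for i, char in enumerate(text): if not char.isspace(): prefix_end = i; break' with for/else
-- (none = the else branch: string is all whitespace)
def gwFindPrefixEnd : List Char → Nat → Option Nat
  | [], _ => none
  | c :: cs, i => if ¬ PySem.Chars.isspace c then some i else gwFindPrefixEnd cs (i + 1)

-- backward loop: 'for i in range(len(text)-1, -1, -1): if not text[i].isspace(): suffix_start = i+1; break'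
-- argument = number of indices still to scan; 0 = loop exhausted, suffix_start keeps its initial value len(text)
def gwFindSuffixStart (cs : List Char) : Nat → Nat
  | 0 => cs.length
  | i + 1 => if ¬ PySem.Chars.isspace (cs.getD i ' ') then i + 1 else gwFindSuffixStart cs i

def get_whitespace_around (text : String) : String × String :=
  if text = "" then ("", "")
  else
    match gwFindPrefixEnd text.toList 0 with
    | none => (text, "")
    | some prefix_end =>
      let suffix_start := gwFindSuffixStart text.toList text.toList.length
      (PySem.Str.slice text none (some (prefix_end : Int)),
       PySem.Str.slice text (some (suffix_start : Int)) none)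

-- ===== PORT B =====
-- loop body: state = (prefix, pending, in_prefix)
def gwStep (st : List Char × List Char × Bool) (c : Char) : List Char × List Char × Bool :=
  if PySem.Chars.isspace c then
    if st.2.2 then (st.1 ++ [c], st.2.1, st.2.2)
    else (st.1, st.2.1 ++ [c], st.2.2)
  else (st.1, [], false)

def get_whitespace_around_alt (text : String) : String × String :=
  let st := text.toList.foldl gwStep ([], [], true)
  (String.ofList st.1, String.ofList st.2.1)

-- ===== PRECONDITION & SPEC =====
def Spec_get_whitespace_around (text : String) (out : String × String) : Prop := out = get_whitespace_around_alt text
instance (text : String) (out : String × String) : Decidable (Spec_get_whitespace_around text out) := by unfold Spec_get_whitespace_around; infer_instance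

-- ===== CLAIM (what is proved, stated in full; the proofs are below) =====
def Claim_equal_get_whitespace_around : Prop := ∀ (text : String), Dom_get_whitespace_around text → Spec_get_whitespace_around text (get_whitespace_around text)

-- ===== LEMMAS AND PROOFS =====

-- the trailing-whitespace run of cs
def gwTrail (cs : List Char) : List Char := (cs.reverse.takeWhile PySem.Chars.isspace).reverse

lemma gwTrail_cons_of_not_all (c : Char) (cs : List Char)
    (h : cs.all PySem.Chars.isspace = false) : gwTrail (c :: cs) = gwTrail cs := by
  unfold gwTrail
  rw [List.reverse_cons, List.takeWhile_append, if_neg ?_]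
  intro hlen
  have heq := ((List.takeWhile_sublist _).eq_of_length hlen)
  have hall : cs.all PySem.Chars.isspace = true := by
    rw [← List.all_reverse]
    exact List.all_eq_true.mpr (List.takeWhile_eq_self_iff.mp heq)
  rw [hall] at h; exact Bool.noConfusion h

lemma gwTrail_nonspace_cons_of_all (c : Char) (cs : List Char)
    (hc : PySem.Chars.isspace c = false) (hcs : cs.all PySem.Chars.isspace = true) :
    gwTrail (c :: cs) = cs := by
  have hfull : List.takeWhile PySem.Chars.isspace cs.reverse = cs.reverse :=
    List.takeWhile_eq_self_iff.mpr (fun x hx =>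
      List.all_eq_true.mp (by simpa [List.all_reverse] using hcs) x hx)
  unfold gwTrail
  rw [List.reverse_cons, List.takeWhile_append, if_pos (by rw [hfull])]
  simp [List.takeWhile, hc]

-- after a non-space character: prefix frozen, flag false, pending tracks the trailing run
lemma gwFold_false (cs : List Char) : ∀ p q : List Char,
    cs.foldl gwStep (p, q, false) =
      (p, (if cs.all PySem.Chars.isspace then q ++ cs else gwTrail cs), false) := by
  induction cs with
  | nil => intro p q; simp
  | cons c cs ih =>
    intro p q
    by_cases hc : PySem.Chars.isspace c = true
    · rw [List.foldl_cons, show gwStep (p, q, false) c = (p, q ++ [c], false) by simp [gwStep, hc], ih]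
      by_cases hall : cs.all PySem.Chars.isspace = true
      · simp [hall, hc]
      · have hall' : cs.all PySem.Chars.isspace = false := Bool.eq_false_iff.mpr hall
        simp [hall', hc, gwTrail_cons_of_not_all c cs hall']
    · have hc' : PySem.Chars.isspace c = false := by simpa using hc
      rw [List.foldl_cons, show gwStep (p, q, false) c = (p, [], false) by simp [gwStep, hc'], ih]
      have hall : (c :: cs).all PySem.Chars.isspace = false := by simp [hc']
      by_cases hcs : cs.all PySem.Chars.isspace = true
      · simp [hcs, hall, gwTrail_nonspace_cons_of_all c cs hc' hcs]
      · have hcs' : cs.all PySem.Chars.isspace = false := Bool.eq_false_iff.mpr hcs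
        simp [hcs', hall, gwTrail_cons_of_not_all c cs hcs']

-- the whole fold characterised
lemma gwFold_main (cs : List Char) : ∀ p : List Char,
    cs.foldl gwStep (p, [], true) =
      (if cs.all PySem.Chars.isspace then (p ++ cs, [], true)
       else (p ++ cs.takeWhile PySem.Chars.isspace, gwTrail cs, false)) := by
  induction cs with
  | nil => intro p; simp
  | cons c cs ih =>
    intro p
    by_cases hc : PySem.Chars.isspace c = true
    · rw [List.foldl_cons, show gwStep (p, [], true) c = (p ++ [c], [], true) by simp [gwStep, hc], ih]
      by_cases hall : cs.all PySem.Chars.isspace = true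
      · simp [hall, hc]
      · have hall' : cs.all PySem.Chars.isspace = false := Bool.eq_false_iff.mpr hall
        simp [hall', hc, gwTrail_cons_of_not_all c cs hall', List.takeWhile_cons_of_pos hc]
    · have hc' : PySem.Chars.isspace c = false := by simpa using hc
      rw [List.foldl_cons, show gwStep (p, [], true) c = (p, [], false) by simp [gwStep, hc'], gwFold_false]
      have hall : (c :: cs).all PySem.Chars.isspace = false := by simp [hc']
      have htw : List.takeWhile PySem.Chars.isspace (c :: cs) = [] := by
        simp [List.takeWhile, hc']
      by_cases hcs : cs.all PySem.Chars.isspace = true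
      · simp [hcs, hall, htw, gwTrail_nonspace_cons_of_all c cs hc' hcs]
      · have hcs' : cs.all PySem.Chars.isspace = false := Bool.eq_false_iff.mpr hcs
        simp [hcs', hall, htw, gwTrail_cons_of_not_all c cs hcs']

-- A-side characterisations of the two scanning loops
lemma gwFindPrefixEnd_eq (cs : List Char) : ∀ i : Nat,
    gwFindPrefixEnd cs i =
      if cs.dropWhile PySem.Chars.isspace = [] then none
      else some (i + (cs.takeWhile PySem.Chars.isspace).length) := by
  induction cs with
  | nil => intro i; simp [gwFindPrefixEnd]
  | cons c cs ih =>
    intro i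
    by_cases hc : PySem.Chars.isspace c
    · rw [show gwFindPrefixEnd (c :: cs) i = gwFindPrefixEnd cs (i + 1) by
        simp [gwFindPrefixEnd, hc]]
      rw [ih (i + 1), List.dropWhile_cons_of_pos hc, List.takeWhile_cons_of_pos hc]
      split_ifs
      · rfl
      · simp; omega
    · simp [gwFindPrefixEnd, hc, List.dropWhile_cons_of_neg (by simpa using hc),
        List.takeWhile_cons_of_neg (by simpa using hc)]

lemma rstrip_append_space (xs : List Char) (c : Char) (h : PySem.Chars.isspace c = true) :
    PySem.Chars.rstrip (xs ++ [c]) = PySem.Chars.rstrip xs := by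
  simp [PySem.Chars.rstrip, h]

lemma rstrip_append_nonspace (xs : List Char) (c : Char) (h : PySem.Chars.isspace c = false) :
    PySem.Chars.rstrip (xs ++ [c]) = xs ++ [c] := by
  simp [PySem.Chars.rstrip, h]

lemma gwFindSuffixStart_eq (cs : List Char) : ∀ n : Nat, n ≤ cs.length →
    gwFindSuffixStart cs n =
      if (cs.take n).all PySem.Chars.isspace then cs.length
      else (PySem.Chars.rstrip (cs.take n)).length := by
  intro n
  induction n with
  | zero => intro _; simp [gwFindSuffixStart]
  | succ m ih =>
    intro hle
    have hm : m < cs.length := by omega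
    have htake : cs.take (m + 1) = cs.take m ++ [cs[m]] := by
      rw [List.take_add_one, List.getElem?_eq_getElem hm]; rfl
    by_cases hc : PySem.Chars.isspace cs[m] = true
    · rw [show gwFindSuffixStart cs (m + 1) = gwFindSuffixStart cs m by
        rw [gwFindSuffixStart, List.getD_eq_getElem?_getD, List.getElem?_eq_getElem hm]
        simp [hc]]
      rw [ih (by omega), htake]
      by_cases hall : (cs.take m).all PySem.Chars.isspace = true
      · have hall2 : ((cs.take m ++ [cs[m]]).all PySem.Chars.isspace) = true := by
          rw [List.all_append]; simp [hall, hc]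
        rw [if_pos hall, if_pos hall2]
      · have hall' : (cs.take m).all PySem.Chars.isspace = false := Bool.eq_false_iff.mpr hall
        have hnall : ((cs.take m ++ [cs[m]]).all PySem.Chars.isspace) = false := by
          rw [List.all_append, hall']; rfl
        rw [if_neg hall, if_neg (ne_true_of_eq_false hnall), rstrip_append_space _ _ hc]
    · have hc' : PySem.Chars.isspace cs[m] = false := by simpa using hc
      rw [show gwFindSuffixStart cs (m + 1) = m + 1 by
        rw [gwFindSuffixStart, List.getD_eq_getElem?_getD, List.getElem?_eq_getElem hm]
        simp [hc']]
      have hnall : ((cs.take m ++ [cs[m]]).all PySem.Chars.isspace) = false := by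
        rw [List.all_append]; simp [hc']
      rw [htake, if_neg (ne_true_of_eq_false hnall), rstrip_append_nonspace _ _ hc']
      simp [List.length_take]
      omega

-- rstrip is the complement of the trailing run
lemma rstrip_append_trail (cs : List Char) :
    PySem.Chars.rstrip cs ++ gwTrail cs = cs := by
  induction cs using List.reverseRecOn with
  | nil => decide
  | append_singleton xs c ih =>
    by_cases hc : PySem.Chars.isspace c = true
    · rw [rstrip_append_space xs c hc]
      have htr : gwTrail (xs ++ [c]) = gwTrail xs ++ [c] := by
        unfold gwTrail
        rw [List.reverse_append, List.reverse_singleton, List.singleton_append,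
          List.takeWhile_cons_of_pos hc, List.reverse_cons]
      rw [htr, ← List.append_assoc, ih]
    · have hc' : PySem.Chars.isspace c = false := by simpa using hc
      rw [rstrip_append_nonspace xs c hc']
      have htr : gwTrail (xs ++ [c]) = [] := by
        unfold gwTrail
        rw [List.reverse_append, List.reverse_singleton, List.singleton_append,
          List.takeWhile_cons_of_neg (by simp [hc'])]
        rfl
      rw [htr, List.append_nil]

-- ===== VERDICT (by name: the statement is the Claim_ definition above) =====
theorem get_whitespace_around_spec : Claim_equal_get_whitespace_around := by
  intro text _
  unfold Spec_get_whitespace_around get_whitespace_around get_whitespace_around_alt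
  set cs := text.toList with hcs
  rw [gwFold_main cs []]
  by_cases hall : cs.all PySem.Chars.isspace = true
  · -- all whitespace (including the empty string)
    have hdrop : cs.dropWhile PySem.Chars.isspace = [] :=
      List.dropWhile_eq_nil_iff.mpr (fun x hx => List.all_eq_true.mp hall x hx)
    have hA : gwFindPrefixEnd cs 0 = none := by rw [gwFindPrefixEnd_eq, if_pos hdrop]
    have hofl : String.ofList cs = text := by rw [hcs, String.ofList_toList]
    by_cases hempty : text = ""
    · subst hempty
      simp only [String.toList_empty] at hcs
      simp [hall, ← hcs, hofl]
    · rw [if_neg hempty, hA, if_pos hall]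
      show (text, "") = (String.ofList ([] ++ cs), String.ofList [])
      rw [List.nil_append, hofl, String.ofList_nil]
  · -- a non-space character exists
    have hne : text ≠ "" := by
      intro h; subst h
      simp only [String.toList_empty] at hcs
      exact hall (by rw [hcs]; rfl)
    have hdrop : cs.dropWhile PySem.Chars.isspace ≠ [] := by
      intro h
      exact hall (List.all_eq_true.mpr (List.dropWhile_eq_nil_iff.mp h))
    have hA : gwFindPrefixEnd cs 0 = some (cs.takeWhile PySem.Chars.isspace).length := by
      rw [gwFindPrefixEnd_eq, if_neg hdrop]; simp
    have hallb : (cs.take cs.length).all PySem.Chars.isspace = false := by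
      rw [List.take_length]; exact Bool.eq_false_iff.mpr hall
    have hS : gwFindSuffixStart cs cs.length = (PySem.Chars.rstrip cs).length := by
      rw [gwFindSuffixStart_eq cs cs.length le_rfl, hallb]
      simp [List.take_length]
    rw [if_neg hne, hA, if_neg (by exact hall), hS]
    have hpre : PySem.Str.slice text none (some (((cs.takeWhile PySem.Chars.isspace).length : Nat) : Int))
        = String.ofList (cs.takeWhile PySem.Chars.isspace) := by
      rw [← String.toList_inj, PySem.Str.toList_slice, ← hcs,
        PySem.Chars.slice_eq_listSlice, PySem.List.slice_to_natCast,
        (List.prefix_iff_eq_take.mp (List.takeWhile_prefix _)).symm, String.toList_ofList]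
    have hsuf : PySem.Str.slice text (some (((PySem.Chars.rstrip cs).length : Nat) : Int)) none
        = String.ofList (gwTrail cs) := by
      rw [← String.toList_inj, PySem.Str.toList_slice, ← hcs,
        PySem.Chars.slice_eq_listSlice, PySem.List.slice_from_natCast, String.toList_ofList]
      have hsplit := rstrip_append_trail cs
      calc List.drop (PySem.Chars.rstrip cs).length cs
          = List.drop (PySem.Chars.rstrip cs).length (PySem.Chars.rstrip cs ++ gwTrail cs) := by
            rw [hsplit]
        _ = gwTrail cs := List.drop_left
    show (PySem.Str.slice text none (some (((List.takeWhile PySem.Chars.isspace cs).length : Nat) : Int)),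
          PySem.Str.slice text (some (((PySem.Chars.rstrip cs).length : Nat) : Int)) none)
        = (String.ofList ([] ++ List.takeWhile PySem.Chars.isspace cs), String.ofList (gwTrail cs))
    rw [List.nil_append, hpre, hsuf]
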